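-- pv_equiv track=rewrite | github.com/Jereff77/SPHCFDIs | src/factura_mapper.py | _clean_concepto
-- ===== SOURCE A (Python) =====
-- def _clean_concepto(concepto: str) -> str:
--     """
--     Limpia el campo concepto para que cumpla con los requisitos
--
--     Args:
--         concepto: Texto del concepto
--
--     Returns:
--         str: Concepto limpio
--     """
--     if not concepto:
--         return "Sin descripción"
--
--     # Limitar longitud si es muy largo
--     if len(concepto) > 500:
--         concepto = concepto[:497] + "..."
--
--     # Reemplazar caracteres problemáticos
--     concepto = concepto.replace('"', "'")
--     concepto = concepto.replace('\n', ' ')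
--     concepto = concepto.replace('\r', ' ')
--
--     # Eliminar espacios múltiples
--     while '  ' in concepto:
--         concepto = concepto.replace('  ', ' ')
--
--     return concepto.strip()
-- ===== SOURCE B (Python) =====
-- def _clean_concepto(concepto: str) -> str:
--     """One-pass rewrite: map problematic chars and collapse space runs in a single scan."""
--     if not concepto:
--         return "Sin descripción"
--
--     if len(concepto) > 500:
--         concepto = concepto[:497] + "..."
--
--     out = []
--     prev_space = False
--     for ch in concepto:
--         if ch == '"':
--             ch = "'"
--         elif ch == '\n' or ch == '\r':
--             ch = ' '
--         if ch == ' ':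
--             if not prev_space:
--                 out.append(' ')
--             prev_space = True
--         else:
--             out.append(ch)
--             prev_space = False
--     return ''.join(out).strip()
-- ===== Notes on version B (the rewrite author's own statement) =====
-- stated objective: alternative
-- what changed: The four replace passes plus the repeated rescan-and-rebuild while loop are replaced by a single left-to-right scan that maps each character and skips a space that follows a space.
import Mathlib
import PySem

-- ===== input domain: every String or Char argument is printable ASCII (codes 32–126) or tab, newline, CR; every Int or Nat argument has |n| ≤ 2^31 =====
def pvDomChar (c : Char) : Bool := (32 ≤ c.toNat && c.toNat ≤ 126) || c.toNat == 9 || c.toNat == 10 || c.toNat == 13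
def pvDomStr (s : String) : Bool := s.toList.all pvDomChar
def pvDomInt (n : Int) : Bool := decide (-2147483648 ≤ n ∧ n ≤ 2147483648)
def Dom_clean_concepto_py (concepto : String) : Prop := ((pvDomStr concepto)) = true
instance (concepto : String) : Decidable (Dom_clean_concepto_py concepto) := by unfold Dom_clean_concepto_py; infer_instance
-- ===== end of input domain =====

-- B replaces A's four `.replace` passes and the `while '  ' in s` rescan loop by one
-- left-to-right scan that maps each character and drops a space following a space
-- (objective: alternative single-pass algorithm; same results).

-- ===== PORT A =====
-- Termination support for the `while '  ' in concepto` loop of A (cited by the port's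
-- decreasing_by): one replace pass of "  " -> " " strictly shortens a string containing "  ".
def pvRep2 : List Char → List Char
  | [] => []
  | [c] => [c]
  | a :: b :: t => if a = ' ' ∧ b = ' ' then ' ' :: pvRep2 t else a :: pvRep2 (b :: t)

def pvNodbl : List Char → Bool
  | a :: b :: t => !(a == ' ' && b == ' ') && pvNodbl (b :: t)
  | _ => true

lemma pvRep2_cc (a b : Char) (t : List Char) :
    pvRep2 (a :: b :: t) = if a = ' ' ∧ b = ' ' then ' ' :: pvRep2 t else a :: pvRep2 (b :: t) := rfl

lemma pvNodbl_cc (a b : Char) (t : List Char) :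
    (pvNodbl (a :: b :: t) = false) ↔ ((a = ' ' ∧ b = ' ') ∨ pvNodbl (b :: t) = false) := by
  by_cases ha : a = ' ' <;> by_cases hb : b = ' ' <;> simp [pvNodbl, ha, hb]

lemma pvGo_double : ∀ (fuel : Nat) (l acc : List Char), l.length ≤ fuel →
    PySem.Chars.replace.go [' ', ' '] [' '] fuel l acc = acc.reverse ++ pvRep2 l := by
  intro fuel
  induction fuel with
  | zero =>
    intro l acc h
    have : l = [] := List.length_eq_zero_iff.mp (Nat.le_zero.mp h)
    subst this; simp [PySem.Chars.replace.go, pvRep2]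
  | succ n ih =>
    intro l acc h
    match l with
    | [] => simp [PySem.Chars.replace.go, pvRep2]
    | [c] =>
      have hpre : [' ', ' '].isPrefixOf [c] = false := by
        simp [List.isPrefixOf]
      simp only [PySem.Chars.replace.go, hpre, Bool.false_eq_true, if_false]
      rw [ih [] (c :: acc) (by simp)]
      simp [pvRep2]
    | c :: d :: t' =>
      by_cases hc : c = ' ' ∧ d = ' '
      · obtain ⟨rfl, rfl⟩ := hc
        have hpre : [' ', ' '].isPrefixOf (' ' :: ' ' :: t') = true := by
          simp [List.isPrefixOf]
        simp only [PySem.Chars.replace.go, hpre, if_true]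
        rw [show List.drop [' ', ' '].length (' ' :: ' ' :: t') = t' from rfl]
        rw [ih t' ([' '].reverse ++ acc) (by simp at h ⊢; omega)]
        rw [pvRep2_cc, if_pos ⟨rfl, rfl⟩]
        simp
      · have hpre : [' ', ' '].isPrefixOf (c :: d :: t') = false := by
          simp only [List.isPrefixOf, Bool.and_true, Bool.and_eq_false_iff, beq_eq_false_iff_ne,
            ne_eq]
          by_cases h1 : c = ' '
          · exact Or.inr fun hd => hc ⟨h1, hd.symm⟩
          · exact Or.inl fun hce => h1 hce.symm
        simp only [PySem.Chars.replace.go, hpre, Bool.false_eq_true, if_false]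
        rw [ih (d :: t') (c :: acc) (by simp at h ⊢; omega)]
        rw [pvRep2_cc, if_neg hc]
        simp

lemma pvReplace_double (l : List Char) :
    PySem.Chars.replace l [' ', ' '] [' '] = pvRep2 l := by
  have := pvGo_double l.length l [] (le_refl _)
  simpa [PySem.Chars.replace] using this

lemma pvRep2_len_le : ∀ (n : Nat) (l : List Char), l.length ≤ n → (pvRep2 l).length ≤ l.length := by
  intro n
  induction n with
  | zero =>
    intro l h
    have : l = [] := List.length_eq_zero_iff.mp (Nat.le_zero.mp h)
    subst this; simp [pvRep2]
  | succ n ih =>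
    intro l h
    match l with
    | [] => simp [pvRep2]
    | [c] => simp [pvRep2]
    | a :: b :: t =>
      rw [pvRep2_cc]
      by_cases hab : a = ' ' ∧ b = ' '
      · rw [if_pos hab]
        have := ih t (by simp at h ⊢; omega)
        simp at h ⊢; omega
      · rw [if_neg hab]
        have := ih (b :: t) (by simp at h ⊢; omega)
        simp at this ⊢; omega

lemma pvRep2_len_lt : ∀ (n : Nat) (l : List Char), l.length ≤ n → pvNodbl l = false →
    (pvRep2 l).length < l.length := by
  intro n
  induction n with
  | zero =>
    intro l h hn
    have : l = [] := List.length_eq_zero_iff.mp (Nat.le_zero.mp h)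
    subst this; simp [pvNodbl] at hn
  | succ n ih =>
    intro l h hn
    match l with
    | [] => simp [pvNodbl] at hn
    | [c] => simp [pvNodbl] at hn
    | a :: b :: t =>
      rw [pvRep2_cc]
      rcases (pvNodbl_cc a b t).mp hn with hab | hrec
      · rw [if_pos hab]
        have := pvRep2_len_le t.length t (le_refl _)
        simp; omega
      · by_cases hab : a = ' ' ∧ b = ' '
        · rw [if_pos hab]
          have := pvRep2_len_le t.length t (le_refl _)
          simp; omega
        · rw [if_neg hab]
          have := ih (b :: t) (by simp at h ⊢; omega) hrec
          simp at this ⊢; omega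

lemma pvPrefix_cc (c d : Char) (t : List Char) :
    [' ', ' '] <+: (c :: d :: t) ↔ (c = ' ' ∧ d = ' ') := by
  constructor
  · intro hp
    rcases List.cons_prefix_cons.mp hp with ⟨h1, hp2⟩
    rcases List.cons_prefix_cons.mp hp2 with ⟨h2, _⟩
    exact ⟨h1.symm, h2.symm⟩
  · rintro ⟨rfl, rfl⟩
    exact ⟨t, rfl⟩

lemma pvIsIn_iff (l : List Char) :
    PySem.Chars.isIn [' ', ' '] l = true ↔ pvNodbl l = false := by
  rw [PySem.Chars.isIn_iff_infix]
  induction l with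
  | nil => simp [pvNodbl]
  | cons c t ih =>
    rw [List.infix_cons_iff]
    match t with
    | [] =>
      simp [List.cons_prefix_cons, show pvNodbl [c] = true from rfl]
    | d :: t' =>
      rw [pvPrefix_cc, pvNodbl_cc, ih]

lemma pvReplace_two_len_lt {l : List Char} (h : PySem.Chars.isIn [' ', ' '] l = true) :
    (PySem.Chars.replace l [' ', ' '] [' ']).length < l.length := by
  rw [pvReplace_double]
  exact pvRep2_len_lt l.length l (le_refl _) ((pvIsIn_iff l).mp h)

-- `while '  ' in concepto: concepto = concepto.replace('  ', ' ')`
def pvCollapse (l : List Char) : List Char :=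
  if h : PySem.Chars.isIn [' ', ' '] l = true then
    pvCollapse (PySem.Chars.replace l [' ', ' '] [' '])
  else l
termination_by l.length
decreasing_by exact pvReplace_two_len_lt h

def clean_concepto_py (concepto : String) : String :=
  if PySem.Str.len concepto = 0 then "Sin descripción"
  else
    let c0 := concepto.toList
    let c1 := if 500 < PySem.Chars.len c0
              then PySem.Chars.slice c0 none (some 497) ++ "...".toList
              else c0
    let c2 := PySem.Chars.replace c1 ['"'] ['\'']
    let c3 := PySem.Chars.replace c2 ['\n'] [' ']
    let c4 := PySem.Chars.replace c3 ['\r'] [' ']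
    String.ofList (PySem.Chars.strip (pvCollapse c4))

-- ===== PORT B =====
-- the single pass: map each char, skip a space whose predecessor (after mapping) was a space
def pvPass1 : List Char → Bool → List Char
  | [], _ => []
  | c :: t, prev =>
    let c' := if c = '"' then '\'' else if c = '\n' || c = '\r' then ' ' else c
    if c' = ' ' then
      if prev then pvPass1 t true else ' ' :: pvPass1 t true
    else c' :: pvPass1 t false

def clean_concepto_py_alt (concepto : String) : String :=
  if PySem.Str.len concepto = 0 then "Sin descripción"
  else
    let c0 := concepto.toList
    let c1 := if 500 < PySem.Chars.len c0
              then PySem.Chars.slice c0 none (some 497) ++ "...".toList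
              else c0
    String.ofList (PySem.Chars.strip (pvPass1 c1 false))

-- ===== PRECONDITION & SPEC =====
def Spec_clean_concepto_py (concepto : String) (out : String) : Prop := out = clean_concepto_py_alt concepto
instance (concepto : String) (out : String) : Decidable (Spec_clean_concepto_py concepto out) := by unfold Spec_clean_concepto_py; infer_instance

-- ===== CLAIM (what is proved, stated in full; the proofs are below) =====
def Claim_equal_clean_concepto_py : Prop := ∀ (concepto : String), Dom_clean_concepto_py concepto → Spec_clean_concepto_py concepto (clean_concepto_py concepto)

-- ===== LEMMAS AND PROOFS =====

-- the character map B applies in its pass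
def pvF (c : Char) : Char := if c = '"' then '\'' else if c = '\n' || c = '\r' then ' ' else c

-- space-run squeezing alone (proof-side normal form)
def pvSq : List Char → Bool → List Char
  | [], _ => []
  | c :: t, prev =>
    if c = ' ' then
      if prev then pvSq t true else ' ' :: pvSq t true
    else c :: pvSq t false

lemma pvSq_cons (c : Char) (t : List Char) (prev : Bool) :
    pvSq (c :: t) prev
      = if c = ' ' then (if prev then pvSq t true else ' ' :: pvSq t true)
        else c :: pvSq t false := rfl

lemma pvPass1_eq_sq_map (l : List Char) : ∀ prev, pvPass1 l prev = pvSq (l.map pvF) prev := by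
  induction l with
  | nil => intro prev; simp [pvPass1, pvSq]
  | cons c t ih =>
    intro prev
    rw [List.map_cons, pvSq_cons]
    show (if pvF c = ' ' then if prev then pvPass1 t true else ' ' :: pvPass1 t true
          else pvF c :: pvPass1 t false) = _
    by_cases h : pvF c = ' ' <;> simp [h, ih]

lemma pvGo_single (a b : Char) : ∀ (fuel : Nat) (l acc : List Char), l.length ≤ fuel →
    PySem.Chars.replace.go [a] [b] fuel l acc
      = acc.reverse ++ l.map (fun c => if c = a then b else c) := by
  intro fuel
  induction fuel with
  | zero =>
    intro l acc h
    have : l = [] := List.length_eq_zero_iff.mp (Nat.le_zero.mp h)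
    subst this; simp [PySem.Chars.replace.go]
  | succ n ih =>
    intro l acc h
    match l with
    | [] => simp [PySem.Chars.replace.go]
    | c :: t =>
      by_cases hc : c = a
      · subst hc
        have hpre : [c].isPrefixOf (c :: t) = true := by simp [List.isPrefixOf]
        simp only [PySem.Chars.replace.go, hpre, if_true]
        rw [show List.drop [c].length (c :: t) = t from rfl]
        rw [ih t ([b].reverse ++ acc) (by simp at h ⊢; omega)]
        simp
      · have hpre : [a].isPrefixOf (c :: t) = false := by
          simp only [List.isPrefixOf, Bool.and_true, beq_eq_false_iff_ne, ne_eq]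
          exact fun hh => hc hh.symm
        simp only [PySem.Chars.replace.go, hpre, Bool.false_eq_true, if_false]
        rw [ih t (c :: acc) (by simp at h ⊢; omega)]
        simp [hc]

lemma pvReplace_single (l : List Char) (a b : Char) :
    PySem.Chars.replace l [a] [b] = l.map (fun c => if c = a then b else c) := by
  have := pvGo_single a b l.length l [] (le_refl _)
  simpa [PySem.Chars.replace] using this

lemma pvMap_three (l : List Char) :
    ((l.map (fun c => if c = '"' then '\'' else c)).map
        (fun c => if c = '\n' then ' ' else c)).map
        (fun c => if c = '\r' then ' ' else c) = l.map pvF := by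
  simp only [List.map_map]
  apply List.map_congr_left
  intro c _
  simp only [Function.comp, pvF]
  by_cases h1 : c = '"'
  · subst h1; decide
  · by_cases h2 : c = '\n'
    · subst h2; decide
    · by_cases h3 : c = '\r'
      · subst h3; decide
      · simp [h1, h2, h3]

lemma pvSq_nodbl : ∀ (n : Nat) (l : List Char), l.length ≤ n → pvNodbl l = true →
    pvSq l false = l ∧ (l.head? ≠ some ' ' → pvSq l true = l) := by
  intro n
  induction n with
  | zero =>
    intro l h _
    have : l = [] := List.length_eq_zero_iff.mp (Nat.le_zero.mp h)
    subst this; simp [pvSq]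
  | succ n ih =>
    intro l h hn
    match l with
    | [] => simp [pvSq]
    | [c] =>
      constructor
      · by_cases hc : c = ' ' <;> simp [pvSq, hc]
      · intro hh
        have hc : ¬ c = ' ' := by simpa using hh
        simp [pvSq, hc]
    | a :: b :: t =>
      have h1 : (a == ' ' && b == ' ') = false := by
        cases hx : (a == ' ' && b == ' ')
        · rfl
        · simp [pvNodbl, hx] at hn
      have h2 : pvNodbl (b :: t) = true := by
        cases hx : pvNodbl (b :: t)
        · simp [pvNodbl, hx] at hn
        · rfl
      have iht := ih (b :: t) (by simp at h ⊢; omega) h2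
      by_cases ha : a = ' '
      · subst ha
        have hb : ¬ b = ' ' := by
          intro hb; subst hb; simp at h1
        have hbt : (b :: t).head? ≠ some ' ' := by simp [hb]
        constructor
        · rw [pvSq_cons, if_pos rfl, if_neg (by simp), iht.2 hbt]
        · intro hh; simp at hh
      · constructor
        · rw [pvSq_cons, if_neg ha, iht.1]
        · intro _; rw [pvSq_cons, if_neg ha, iht.1]

lemma pvSq_rep2 : ∀ (n : Nat) (l : List Char), l.length ≤ n → ∀ prev,
    pvSq (pvRep2 l) prev = pvSq l prev := by
  intro n
  induction n with
  | zero =>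
    intro l h prev
    have : l = [] := List.length_eq_zero_iff.mp (Nat.le_zero.mp h)
    subst this; simp [pvRep2]
  | succ n ih =>
    intro l h prev
    match l with
    | [] => simp [pvRep2]
    | [c] => simp [pvRep2]
    | a :: b :: t =>
      rw [pvRep2_cc]
      by_cases hab : a = ' ' ∧ b = ' '
      · obtain ⟨rfl, rfl⟩ := hab
        rw [if_pos ⟨rfl, rfl⟩]
        rw [pvSq_cons, pvSq_cons, pvSq_cons, if_pos rfl, if_pos rfl, if_pos rfl]
        have iht := ih t (by simp at h ⊢; omega)
        by_cases hp : prev = true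
        · subst hp; simp [iht]
        · have hp' : prev = false := by cases prev <;> simp_all
          subst hp'; simp [iht]
      · rw [if_neg hab]
        have iht := ih (b :: t) (by simp at h ⊢; omega)
        by_cases ha : a = ' '
        · rw [pvSq_cons, pvSq_cons, if_pos ha, if_pos ha]
          by_cases hp : prev = true
          · subst hp; simp [iht]
          · have hp' : prev = false := by cases prev <;> simp_all
            subst hp'; simp [iht]
        · rw [pvSq_cons, pvSq_cons, if_neg ha, if_neg ha, iht]

lemma pvCollapse_eq_sq : ∀ (n : Nat) (l : List Char), l.length ≤ n →
    pvCollapse l = pvSq l false := by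
  intro n
  induction n with
  | zero =>
    intro l h
    have : l = [] := List.length_eq_zero_iff.mp (Nat.le_zero.mp h)
    subst this
    rw [pvCollapse.eq_def, dif_neg (by decide)]
    simp [pvSq]
  | succ n ih =>
    intro l hl
    by_cases h : PySem.Chars.isIn [' ', ' '] l = true
    · rw [pvCollapse.eq_def, dif_pos h]
      have hlen := pvReplace_two_len_lt h
      rw [ih _ (by omega), pvReplace_double, pvSq_rep2 l.length l (le_refl _)]
    · rw [pvCollapse.eq_def, dif_neg h]
      have hn : pvNodbl l = true := by
        cases ht : pvNodbl l
        · exact absurd ((pvIsIn_iff l).mpr ht) h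
        · rfl
      exact ((pvSq_nodbl l.length l (le_refl _) hn).1).symm

lemma pvCore (l : List Char) :
    pvCollapse (PySem.Chars.replace
        (PySem.Chars.replace (PySem.Chars.replace l ['"'] ['\'']) ['\n'] [' '])
        ['\r'] [' '])
      = pvPass1 l false := by
  rw [pvReplace_single, pvReplace_single, pvReplace_single, pvMap_three,
      pvPass1_eq_sq_map, pvCollapse_eq_sq (l.map pvF).length _ (le_refl _)]

-- ===== VERDICT (by name: the statement is the Claim_ definition above) =====
theorem clean_concepto_py_spec : Claim_equal_clean_concepto_py := by
  intro concepto _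
  unfold Spec_clean_concepto_py
  simp only [clean_concepto_py, clean_concepto_py_alt]
  by_cases h : PySem.Str.len concepto = 0
  · rw [if_pos h, if_pos h]
  · rw [if_neg h, if_neg h]
    exact congrArg String.ofList (congrArg PySem.Chars.strip (pvCore _))
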